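-- pv_equiv track=rewrite | github.com/fabianomonteirofarias-prof/dsa-gfg | 01 - Logic Building/033. Divisibility by 13.py | expected_approach
-- ===== SOURCE A (Python) =====
-- def expected_approach(s: str) -> bool:
--     # Step 1: Pad the number so its length is a multiple of 3
--     if len(s) % 3 != 0:
--         s += "0" * (3 - len(s) % 3)
--
--     sum_ = 0
--     i = len(s) - 1
--     p = 1
--     while i >= 0:
--         # Step 2: Split into 3-digit blocks from right to left
--         block = 0
--
--         block += int(s[i])
--         i -= 1
--
--         block += int(s[i]) * 10
--         i -= 1
--
--         block += int(s[i]) * 100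
--         i -= 1
--
--         # Step 3: Apply alternating signs starting with + on the rightmost block
--         # Step 4: Sum the results
--         sum_ += block * p
--         p *= (-1)
--
--     sum_ = abs(sum_)
--     # Step 5: Check divisibility by 13
--     return sum_ % 13 == 0
-- ===== SOURCE B (Python) =====
-- def expected_approach(s: str) -> bool:
--     # Horner's method: single running remainder mod 13, left to right.
--     r = 0
--     for ch in s:
--         r = (r * 10 + int(ch)) % 13
--     return r == 0
-- ===== Notes on version B (the rewrite author's own statement) =====
-- stated objective: simpler
-- what changed: Replaces the right-padding and alternating-sign 3-digit block summation with a single left-to-right Horner pass maintaining the running remainder mod 13.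
import Mathlib
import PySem

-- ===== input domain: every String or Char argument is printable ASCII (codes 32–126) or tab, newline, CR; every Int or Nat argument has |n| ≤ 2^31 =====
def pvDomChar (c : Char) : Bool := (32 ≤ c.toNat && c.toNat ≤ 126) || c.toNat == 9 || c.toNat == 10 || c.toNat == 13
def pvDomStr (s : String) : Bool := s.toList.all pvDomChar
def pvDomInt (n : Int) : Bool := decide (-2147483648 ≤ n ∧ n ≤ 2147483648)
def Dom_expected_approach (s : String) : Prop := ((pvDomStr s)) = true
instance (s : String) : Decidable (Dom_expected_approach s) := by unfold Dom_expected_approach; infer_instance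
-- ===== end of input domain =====

-- B replaces A's right-padding and alternating-sign 3-digit block sum by a single
-- left-to-right Horner pass keeping a running remainder mod 13 (objective: simpler).

-- ===== PORT A =====
-- int(s[i]) on a one-character string; the getD 0 default is unreachable under Pre_
-- (Python raises ValueError on a non-digit character, excluded by Pre_).
def pvIntChar (c : Char) : Int := (PySem.Int.ofChars? [c]).getD 0

-- the while loop of A, walking the reversed padded string three digits at a time
def pvBlocksA : List Char → Int → Int → Int
  | a :: b :: c :: rest, sum, p =>
      pvBlocksA rest (sum + (pvIntChar a + pvIntChar b * 10 + pvIntChar c * 100) * p) (p * (-1))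
  | _, sum, _ => sum

def expected_approach (s : String) : Bool :=
  PySem.Int.mod
    |pvBlocksA (if s.toList.length % 3 ≠ 0 then
        s.toList ++ List.replicate (3 - s.toList.length % 3) '0' else s.toList).reverse 0 1|
    13 == 0

-- ===== PORT B =====
-- B's for-loop: r = (r*10 + int(ch)) % 13 over the characters, left to right
def pvHorner : List Char → Int → Int
  | [], r => r
  | c :: rest, r => pvHorner rest (PySem.Int.mod (r * 10 + pvIntChar c) 13)

def expected_approach_alt (s : String) : Bool := pvHorner s.toList 0 == 0

-- ===== PRECONDITION & SPEC =====
-- Pre_ excludes exactly the strings with a non-digit character, on which int() in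
-- both A and B raises ValueError (the empty string is admitted; both return True).
def Pre_expected_approach (s : String) : Prop := s.toList.all PySem.Chars.isdigit = true
instance (s : String) : Decidable (Pre_expected_approach s) := by unfold Pre_expected_approach; infer_instance
def pvWitness_expected_approach : String := "26"

def Spec_expected_approach (s : String) (out : Bool) : Prop := out = expected_approach_alt s
instance (s : String) (out : Bool) : Decidable (Spec_expected_approach s out) := by unfold Spec_expected_approach; infer_instance

-- ===== CLAIM (what is proved, stated in full; the proofs are below) =====
def Claim_equal_expected_approach : Prop := ∀ (s : String), Dom_expected_approach s → Pre_expected_approach s → Spec_expected_approach s (expected_approach s)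

-- ===== LEMMAS AND PROOFS =====

-- the integer value of a digit string, accumulated from r (foldl, left to right)
def pvVal (l : List Char) (r : Int) : Int :=
  l.foldl (fun a c => a * 10 + ((c.toNat : Int) - 48)) r

theorem pv_digit_mem (c : Char) (h : PySem.Chars.isdigit c = true) :
    c ∈ ['0','1','2','3','4','5','6','7','8','9'] := by
  simp only [PySem.Chars.isdigit, Bool.and_eq_true, decide_eq_true_eq, Char.le_def,
    UInt32.le_iff_toNat_le] at h
  obtain ⟨h1, h2⟩ := h
  have hc : c = Char.ofNat c.toNat := (Char.ofNat_toNat c).symm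
  have : c.toNat = 48 ∨ c.toNat = 49 ∨ c.toNat = 50 ∨ c.toNat = 51 ∨ c.toNat = 52 ∨
      c.toNat = 53 ∨ c.toNat = 54 ∨ c.toNat = 55 ∨ c.toNat = 56 ∨ c.toNat = 57 := by
    unfold Char.toNat; change (48:Nat) ≤ _ at h1; change _ ≤ (57:Nat) at h2; omega
  rcases this with h|h|h|h|h|h|h|h|h|h <;> rw [hc, h] <;> decide

theorem pvIntChar_digit (c : Char) (h : PySem.Chars.isdigit c = true) :
    pvIntChar c = (c.toNat : Int) - 48 := by
  have := pv_digit_mem c h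
  fin_cases this <;> decide

theorem pv_digit_bounds (c : Char) (h : PySem.Chars.isdigit c = true) :
    0 ≤ (c.toNat : Int) - 48 ∧ (c.toNat : Int) - 48 ≤ 9 := by
  have := pv_digit_mem c h
  fin_cases this <;> decide

theorem pvVal_append (x y : List Char) (r : Int) :
    pvVal (x ++ y) r = pvVal y (pvVal x r) := by
  simp [pvVal, List.foldl_append]

theorem pvVal_replicate_zero (k : Nat) (r : Int) :
    pvVal (List.replicate k '0') r = r * 10 ^ k := by
  induction k generalizing r with
  | zero => simp [pvVal]
  | succ n ih =>
      rw [List.replicate_succ]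
      show pvVal (List.replicate n '0') (r * 10 + ((('0'.toNat : Int)) - 48)) = _
      rw [ih]
      have h48 : (('0'.toNat : Int)) = 48 := by decide
      rw [h48]; ring

theorem pvVal_modeq (l : List Char) (r1 r2 : Int) (h : r1 ≡ r2 [ZMOD 13]) :
    pvVal l r1 ≡ pvVal l r2 [ZMOD 13] := by
  induction l generalizing r1 r2 with
  | nil => exact h
  | cons c rest ih =>
      exact ih _ _ ((h.mul_right 10).add_right _)

theorem pvHorner_eq (l : List Char) (r : Int)
    (hd : ∀ c ∈ l, PySem.Chars.isdigit c = true)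
    (h0 : 0 ≤ r) (h13 : r < 13) :
    pvHorner l r = pvVal l r % 13 := by
  induction l generalizing r with
  | nil => simp [pvHorner, pvVal, Int.emod_eq_of_lt h0 h13]
  | cons c rest ih =>
      have hc : PySem.Chars.isdigit c = true := hd c (by simp)
      have hrest : ∀ c ∈ rest, PySem.Chars.isdigit c = true := fun c hm => hd c (by simp [hm])
      have hdv := pv_digit_bounds c hc
      have hx0 : 0 ≤ r * 10 + pvIntChar c := by
        rw [pvIntChar_digit c hc]; nlinarith [hdv.1]
      show pvHorner rest (PySem.Int.mod (r * 10 + pvIntChar c) 13) = _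
      rw [PySem.Int.mod_eq_emod_of_pos (by norm_num)]
      set x := r * 10 + pvIntChar c with hxdef
      have hmod0 : 0 ≤ x % 13 := Int.emod_nonneg x (by norm_num)
      have hmod13 : x % 13 < 13 := Int.emod_lt_of_pos x (by norm_num)
      rw [ih _ hrest hmod0 hmod13]
      have hcong : pvVal rest (x % 13) ≡ pvVal rest x [ZMOD 13] :=
        pvVal_modeq rest _ _ (Int.emod_emod_of_dvd x dvd_rfl)
      have : pvVal (c :: rest) r = pvVal rest x := by
        simp [pvVal, hxdef, pvIntChar_digit c hc]
      rw [this]; exact hcong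

theorem pvBlocksA_modeq (n : Nat) : ∀ (l : List Char), l.length = 3 * n →
    (∀ c ∈ l, PySem.Chars.isdigit c = true) → ∀ (sum p : Int),
    pvBlocksA l sum p ≡ sum + p * pvVal l.reverse 0 [ZMOD 13] := by
  induction n with
  | zero =>
      intro l hl _ sum p
      have : l = [] := List.length_eq_zero_iff.mp (by omega)
      subst this
      simp [pvBlocksA, pvVal]
  | succ n ih =>
      intro l hl hd sum p
      match l, hl with
      | a :: b :: c :: rest, hl =>
        have hrl : rest.length = 3 * n := by simp at hl; omega
        have hda : PySem.Chars.isdigit a = true := hd a (by simp)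
        have hdb : PySem.Chars.isdigit b = true := hd b (by simp)
        have hdc : PySem.Chars.isdigit c = true := hd c (by simp)
        have hdrest : ∀ x ∈ rest, PySem.Chars.isdigit x = true := fun x hm => hd x (by simp [hm])
        show pvBlocksA rest (sum + (pvIntChar a + pvIntChar b * 10 + pvIntChar c * 100) * p) (p * (-1)) ≡ _ [ZMOD 13]
        have hIH := ih rest hrl hdrest (sum + (pvIntChar a + pvIntChar b * 10 + pvIntChar c * 100) * p) (p * (-1))
        refine hIH.trans ?_
        have hrev : (a :: b :: c :: rest).reverse = rest.reverse ++ [c, b, a] := by simp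
        rw [hrev, pvVal_append]
        set V := pvVal rest.reverse 0 with hV
        have hval : pvVal [c, b, a] V =
            V * 1000 + ((c.toNat : Int) - 48) * 100 + ((b.toNat : Int) - 48) * 10 + ((a.toNat : Int) - 48) := by
          simp [pvVal]; ring
        rw [hval, pvIntChar_digit a hda, pvIntChar_digit b hdb, pvIntChar_digit c hdc]
        rw [Int.ModEq]
        have : (sum + p * (V * 1000 + ((c.toNat : Int) - 48) * 100 + ((b.toNat : Int) - 48) * 10 + ((a.toNat : Int) - 48))) -
            (sum + (((a.toNat : Int) - 48) + ((b.toNat : Int) - 48) * 10 + ((c.toNat : Int) - 48) * 100) * p + p * (-1) * V)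
            = 13 * (77 * p * V) := by ring
        omega

theorem pv_beq_zero (x : Int) : (x == 0) = decide (x = 0) := by
  cases h : x == 0 <;> simp_all

theorem pv_dvd_of_pow (V : Int) (k : Nat) : ((13:Int) ∣ V * 10 ^ k) ↔ (13:Int) ∣ V := by
  constructor
  · intro h
    have hp : Prime (13 : Int) := by norm_num
    rcases (hp.dvd_mul).mp h with h1 | h2
    · exact h1
    · exact absurd (hp.dvd_of_dvd_pow h2) (by norm_num)
  · intro h; exact h.mul_right _

-- A's result on a padded digit string equals divisibility of the unpadded value
theorem pvA_core (l : List Char) (k : Nat)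
    (hd : ∀ c ∈ l, PySem.Chars.isdigit c = true)
    (hlen : (l.length + k) % 3 = 0) :
    (PySem.Int.mod |pvBlocksA (l ++ List.replicate k '0').reverse 0 1| 13 == 0)
      = decide ((13:Int) ∣ pvVal l 0) := by
  set t := l ++ List.replicate k '0' with ht
  have hdt : ∀ c ∈ t.reverse, PySem.Chars.isdigit c = true := by
    intro c hm
    rw [List.mem_reverse] at hm
    rcases List.mem_append.mp hm with h1 | h2
    · exact hd c h1
    · rw [List.eq_of_mem_replicate h2]; decide
  have hlt : t.reverse.length = 3 * ((l.length + k) / 3) := by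
    simp [ht]; omega
  have hmod := pvBlocksA_modeq _ t.reverse hlt hdt 0 1
  rw [List.reverse_reverse] at hmod
  have hvt : pvVal t 0 = pvVal l 0 * 10 ^ k := by
    rw [ht, pvVal_append, pvVal_replicate_zero]
  rw [PySem.Int.mod_eq_emod_of_pos (by norm_num), pv_beq_zero]
  have h1 : (|pvBlocksA t.reverse 0 1| % 13 = 0) ↔ (13:Int) ∣ pvVal l 0 := by
    constructor
    · intro h
      have hdvd : (13:Int) ∣ |pvBlocksA t.reverse 0 1| := Int.dvd_of_emod_eq_zero h
      have hdvd2 : (13:Int) ∣ pvBlocksA t.reverse 0 1 := (dvd_abs _ _).mp hdvd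
      have : (13:Int) ∣ pvVal t 0 := by
        have := Int.emod_emod_of_dvd (pvBlocksA t.reverse 0 1) (dvd_refl (13:Int))
        rw [Int.ModEq] at hmod
        have h0 : pvBlocksA t.reverse 0 1 % 13 = 0 := Int.emod_eq_zero_of_dvd hdvd2
        have : pvVal t 0 % 13 = 0 := by
          have : (0 + 1 * pvVal t 0) % 13 = 0 := hmod ▸ h0
          simpa using this
        exact Int.dvd_of_emod_eq_zero this
      rw [hvt] at this
      exact (pv_dvd_of_pow _ _).mp this
    · intro h
      have hvt13 : (13:Int) ∣ pvVal t 0 := by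
        rw [hvt]; exact (pv_dvd_of_pow _ _).mpr h
      rw [Int.ModEq] at hmod
      have : (0 + 1 * pvVal t 0) % 13 = 0 := by
        simpa using Int.emod_eq_zero_of_dvd hvt13
      have h0 : pvBlocksA t.reverse 0 1 % 13 = 0 := by rw [hmod]; exact this
      have : (13:Int) ∣ pvBlocksA t.reverse 0 1 := Int.dvd_of_emod_eq_zero h0
      exact Int.emod_eq_zero_of_dvd ((dvd_abs _ _).mpr this)
  simp [h1]

-- ===== VERDICT (by name: the statement is the Claim_ definition above) =====
theorem expected_approach_spec : Claim_equal_expected_approach := by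
  intro s _ hpre
  unfold Spec_expected_approach
  unfold Pre_expected_approach at hpre
  rw [List.all_eq_true] at hpre
  have hd : ∀ c ∈ s.toList, PySem.Chars.isdigit c = true := fun c hm => hpre c hm
  have hB : expected_approach_alt s = decide ((13:Int) ∣ pvVal s.toList 0) := by
    unfold expected_approach_alt
    rw [pvHorner_eq s.toList 0 hd (by norm_num) (by norm_num), pv_beq_zero]
    simp
  unfold expected_approach
  by_cases h3 : s.toList.length % 3 = 0
  · rw [if_neg (not_ne_iff.mpr h3)]
    have := pvA_core s.toList 0 hd (by omega)
    simp only [List.replicate_zero, List.append_nil] at this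
    rw [this, hB]
  · rw [if_pos (by simpa using h3)]
    rw [pvA_core s.toList (3 - s.toList.length % 3) hd (by omega), hB]
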